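-- pv_equiv track=rewrite | github.com/taehwan920/Algorithm | programmers/that_music.py | san_score
-- ===== SOURCE A (Python) =====
-- def san_score(st):
--     st = list(st)
--     sample = ["C", "D", "F", "G", "A"]
--     change = ["H", "I", "J", "K", "L"]
--     for i in range(len(st)):
--         if st[i] == "#":
--             for j in sample:
--                 if j == st[i-1]:
--                     st[i-1] = change[sample.index(j)]
--             st[i] = 0
--     st = ''.join(list(filter(lambda x: x != 0, st)))
--     return st
-- ===== SOURCE B (Python) =====
-- def san_score(st):
--     m = {'C': 'H', 'D': 'I', 'F': 'J', 'G': 'K', 'A': 'L'}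
--     segs = st.split('#')
--     converted = [s[:-1] + m.get(s[-1], s[-1]) if s else '' for s in segs[:-1]]
--     return ''.join(converted) + segs[-1]
-- ===== Notes on version B (the rewrite author's own statement) =====
-- stated objective: faster
-- what changed: A mutates a char list in place (backward wraparound write before each '#', 0 sentinel, then filter); B splits the string on '#' into segments and rebuilds it by mapping the last character of every non-final nonempty segment through the note dict and joining, with no per-character '#' scanning and no wraparound.
-- intended difference: On strings that start with '#' and end with a mappable note (C,D,F,G,A), A's negative index st[i-1] at i=0 wraps around and converts the LAST character (e.g. '#A' -> 'L'); B leaves it unchanged ('#A' -> 'A'), which is intended because a leading '#' has no preceding note to sharpen. — e.g. on san_score("#A"): A returns "L", B returns "A"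
import Mathlib
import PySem

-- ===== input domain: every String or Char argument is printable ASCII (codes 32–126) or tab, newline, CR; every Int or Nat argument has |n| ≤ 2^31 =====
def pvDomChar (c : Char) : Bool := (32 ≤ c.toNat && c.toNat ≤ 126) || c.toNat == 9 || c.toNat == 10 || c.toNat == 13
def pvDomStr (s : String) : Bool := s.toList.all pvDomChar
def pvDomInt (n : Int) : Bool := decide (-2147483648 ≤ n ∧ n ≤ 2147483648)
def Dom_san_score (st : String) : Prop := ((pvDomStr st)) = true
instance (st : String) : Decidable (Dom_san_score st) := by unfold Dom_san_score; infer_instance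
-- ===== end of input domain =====

-- B replaces A's in-place mutate-then-filter loop (backward wraparound write, 0 sentinel)
-- by a staged split-on-'#' rebuild (map the last char of each non-final nonempty segment, join);
-- B intentionally drops A's negative-index wraparound on strings starting with '#' (see D_ below).
-- A does not observably mutate its argument.

-- ===== PORT A =====
-- Python's mixed list of str and int-0 sentinels is modelled as List (Option Char); none = 0.
def sanSample : List Char := ['C', 'D', 'F', 'G', 'A']
def sanChange : List Char := ['H', 'I', 'J', 'K', 'L']

-- inner 'for j in sample' loop; st[i-1] is read/written with Python index semantics
-- (the .getD defaults are never reached: j ∈ sample, so sample.index(j) is some k, k < 5 = len(change))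
def sanInner (i : Nat) (l : List (Option Char)) : List (Option Char) :=
  sanSample.foldl (fun l j =>
    if PySem.List.pyGet? l ((i : Int) - 1) = some (some j) then
      PySem.List.pySetD l ((i : Int) - 1)
        (some (sanChange.getD ((PySem.List.index? sanSample j).getD 0) 'H'))
    else l) l

def sanStep (l : List (Option Char)) (i : Nat) : List (Option Char) :=
  if PySem.List.pyGet? l (i : Int) = some (some '#') then
    PySem.List.pySetD (sanInner i l) (i : Int) none   -- st[i] = 0
  else l

def san_score (st : String) : String :=
  let l0 : List (Option Char) := st.toList.map some
  let l := (List.range l0.length).foldl sanStep l0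
  String.mk (l.filterMap id)   -- ''.join(filter(lambda x: x != 0, st))

-- ===== PORT B =====
def sanMap : PySem.Dict Char Char := PySem.Dict.ofList [('C','H'), ('D','I'), ('F','J'), ('G','K'), ('A','L')]

-- s[:-1] + m.get(s[-1], s[-1]) if s else ''
def sanConv (s : List Char) : List Char :=
  if s ≠ [] then
    PySem.List.slice s none (some (-1)) ++
      [PySem.Dict.getD sanMap ((PySem.List.pyGet? s (-1)).getD ' ') ((PySem.List.pyGet? s (-1)).getD ' ')]
  else []

def san_score_alt (st : String) : String :=
  let segs := PySem.Chars.splitOn st.toList ['#']     -- st.split('#')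
  let converted := segs.dropLast.map sanConv
  String.mk (converted.flatten ++ (PySem.List.pyGet? segs (-1)).getD [])   -- ''.join(converted) + segs[-1]

-- ===== PRECONDITION & SPEC =====
-- On strings that start with '#' and end with a mappable note (C,D,F,G,A), A's negative index
-- st[i-1] at i=0 wraps around and converts the LAST character (e.g. '#A' -> 'L'); B leaves it
-- unchanged ('#A' -> 'A'), which is intended: a leading '#' has no preceding note to sharpen.
def D_san_score (st : String) : Prop :=
  st.toList.head? = some '#' ∧
    st.toList.getLast? ∈ ([some 'C', some 'D', some 'F', some 'G', some 'A'] : List (Option Char))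
instance (st : String) : Decidable (D_san_score st) := by unfold D_san_score; infer_instance

def Spec_san_score (st : String) (out : String) : Prop := ¬ D_san_score st → out = san_score_alt st
instance (st : String) (out : String) : Decidable (Spec_san_score st out) := by unfold Spec_san_score; infer_instance

def pvDiffWitness_san_score : String := "#A"
def pvDiffWitnessOut_san_score : String × String := ("L", "A")

-- ===== CLAIM (what is proved, stated in full; the proofs are below) =====
def Claim_unchanged_san_score : Prop := ∀ (st : String), Dom_san_score st → Spec_san_score st (san_score st)
def Claim_changed_san_score : Prop := Dom_san_score (pvDiffWitness_san_score) ∧ D_san_score (pvDiffWitness_san_score) ∧ san_score (pvDiffWitness_san_score) = pvDiffWitnessOut_san_score.1 ∧ san_score_alt (pvDiffWitness_san_score) = pvDiffWitnessOut_san_score.2 ∧ pvDiffWitnessOut_san_score.1 ≠ pvDiffWitnessOut_san_score.2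
def Claim_exact_san_score : Prop := ∀ (st : String), Dom_san_score st → D_san_score st → san_score st ≠ san_score_alt st

-- ===== LEMMAS AND PROOFS =====

-- the value A's loop leaves at position p after the first i iterations
def sanTgt (cs : List Char) (i p : Nat) : Option Char :=
  if cs.getD p ' ' = '#' ∧ p < i then none
  else if (PySem.Dict.get? sanMap (cs.getD p ' ')).isSome = true ∧
          cs.getD ((p + 1) % cs.length) ' ' = '#' ∧ (p + 1) % cs.length < i then
    some ((PySem.Dict.get? sanMap (cs.getD p ' ')).getD (cs.getD p ' '))
  else some (cs.getD p ' ')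

theorem sanMap_get?_eq (c : Char) : PySem.Dict.get? sanMap c =
    if c = 'C' then some 'H' else if c = 'D' then some 'I' else if c = 'F' then some 'J'
    else if c = 'G' then some 'K' else if c = 'A' then some 'L' else none := by
  rcases Decidable.em (c = 'C') with h1 | h1
  · subst h1; decide
  rcases Decidable.em (c = 'D') with h2 | h2
  · subst h2; decide
  rcases Decidable.em (c = 'F') with h3 | h3
  · subst h3; decide
  rcases Decidable.em (c = 'G') with h4 | h4
  · subst h4; decide
  rcases Decidable.em (c = 'A') with h5 | h5
  · subst h5; decide
  rw [if_neg h1, if_neg h2, if_neg h3, if_neg h4, if_neg h5]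
  rw [show sanMap = PySem.Dict.mk [('C','H'), ('D','I'), ('F','J'), ('G','K'), ('A','L')] from rfl]
  simp only [PySem.Dict.get?_mk_cons, beq_iff_eq]
  rw [if_neg (fun e => h1 e.symm), if_neg (fun e => h2 e.symm), if_neg (fun e => h3 e.symm),
      if_neg (fun e => h4 e.symm), if_neg (fun e => h5 e.symm)]
  rfl

theorem sanMap_sharp : PySem.Dict.get? sanMap '#' = none := by rw [sanMap_get?_eq]; rfl

theorem sanMap_val_ne_sharp {c h : Char} (hc : PySem.Dict.get? sanMap c = some h) : h ≠ '#' := by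
  rw [sanMap_get?_eq] at hc
  split_ifs at hc <;>
    first
    | exact Option.noConfusion hc
    | (obtain rfl : _ = h := Option.some.inj hc; decide)

theorem pyGet_prev {α : Type} (l : List α) (i : Nat) (h0 : 0 < l.length) :
    PySem.List.pyGet? l ((i : Int) - 1) = l[(if i = 0 then l.length - 1 else i - 1)]? := by
  cases i with
  | zero =>
      have h1 : ((0 : Nat) : Int) - 1 = -1 := by norm_num
      rw [h1, PySem.List.pyGet?_neg_one, List.getLast?_eq_getElem?]
      norm_num
  | succ k =>
      have h1 : ((k + 1 : Nat) : Int) - 1 = ((k : Nat) : Int) := by push_cast; ring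
      rw [h1, PySem.List.pyGet?_natCast]
      simp

theorem pySet_prev (l : List (Option Char)) (i : Nat) (x : Option Char) (h0 : 0 < l.length) :
    PySem.List.pySetD l ((i : Int) - 1) x = l.set (if i = 0 then l.length - 1 else i - 1) x := by
  cases i with
  | zero =>
      have h1 : ((0 : Nat) : Int) - 1 = -1 := by norm_num
      have hidx : PySem.List.pyIdx? l.length (-1) = some (l.length - 1) := by
        unfold PySem.List.pyIdx?
        rw [if_neg (by omega), if_pos (by push_cast; omega)]
        norm_num
      rw [h1]
      simp [PySem.List.pySetD, PySem.List.pySet?, hidx]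
  | succ k =>
      have h1 : ((k + 1 : Nat) : Int) - 1 = ((k : Nat) : Int) := by push_cast; ring
      rw [h1, PySem.List.pySetD_natCast]
      simp

-- the inner 'for j in sample' loop, by the current value of st[i-1]: three outcomes
theorem sanInner_eq_none (l : List (Option Char)) (i : Nat) (h0 : 0 < l.length)
    (hi : i < l.length)
    (hv : l[(if i = 0 then l.length - 1 else i - 1)]? = some none) :
    sanInner i l = l := by
  have hread : PySem.List.pyGet? l ((i : Int) - 1) = some none := by
    rw [pyGet_prev l i h0, hv]
  unfold sanInner sanSample
  simp [hread]

theorem sanInner_eq_unmapped (l : List (Option Char)) (i : Nat) (h0 : 0 < l.length)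
    (hi : i < l.length) (c : Char)
    (hv : l[(if i = 0 then l.length - 1 else i - 1)]? = some (some c))
    (hg : PySem.Dict.get? sanMap c = none) :
    sanInner i l = l := by
  have hread : PySem.List.pyGet? l ((i : Int) - 1) = some (some c) := by
    rw [pyGet_prev l i h0, hv]
  rw [sanMap_get?_eq] at hg
  have h1 : c ≠ 'C' := by intro e; rw [if_pos e] at hg; cases hg
  have h2 : c ≠ 'D' := by intro e; rw [if_neg h1, if_pos e] at hg; cases hg
  have h3 : c ≠ 'F' := by intro e; rw [if_neg h1, if_neg h2, if_pos e] at hg; cases hg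
  have h4 : c ≠ 'G' := by intro e; rw [if_neg h1, if_neg h2, if_neg h3, if_pos e] at hg; cases hg
  have h5 : c ≠ 'A' := by
    intro e; rw [if_neg h1, if_neg h2, if_neg h3, if_neg h4, if_pos e] at hg; cases hg
  unfold sanInner sanSample
  simp [hread, h1, h2, h3, h4, h5]

theorem sanInner_eq_mapped (l : List (Option Char)) (i : Nat) (h0 : 0 < l.length)
    (hi : i < l.length) (c h : Char)
    (hv : l[(if i = 0 then l.length - 1 else i - 1)]? = some (some c))
    (hg : PySem.Dict.get? sanMap c = some h) :
    sanInner i l = l.set (if i = 0 then l.length - 1 else i - 1) (some h) := by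
  have htl : (if i = 0 then l.length - 1 else i - 1) < l.length := by split <;> omega
  have hset : ∀ y : Option Char, PySem.List.pySetD l ((i : Int) - 1) y =
      l.set (if i = 0 then l.length - 1 else i - 1) y := by
    intro y; rw [pySet_prev l i y h0]
  have hreadset : ∀ y : Option Char,
      PySem.List.pyGet? (l.set (if i = 0 then l.length - 1 else i - 1) y) ((i : Int) - 1) =
        some y := by
    intro y
    rw [pyGet_prev (l.set (if i = 0 then l.length - 1 else i - 1) y) i (by simpa using h0)]
    rw [List.length_set, List.getElem?_set, if_pos rfl, if_pos htl]
  rw [sanMap_get?_eq] at hg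
  split_ifs at hg with e1 e2 e3 e4 e5
  · subst e1
    obtain rfl : _ = h := Option.some.inj hg
    have hread : PySem.List.pyGet? l ((i : Int) - 1) = some (some 'C') := by
      rw [pyGet_prev l i h0, hv]
    have hval : sanChange.getD ((PySem.List.index? ['C','D','F','G','A'] 'C').getD 0) 'H' = 'H' := by
      decide
    unfold sanInner sanSample
    simp only [List.foldl_cons, List.foldl_nil, hread, hval, hset]
    simp [hread, hval, hset, hreadset]
  · subst e2
    obtain rfl : _ = h := Option.some.inj hg
    have hread : PySem.List.pyGet? l ((i : Int) - 1) = some (some 'D') := by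
      rw [pyGet_prev l i h0, hv]
    have hval : sanChange.getD ((PySem.List.index? ['C','D','F','G','A'] 'D').getD 0) 'H' = 'I' := by
      decide
    unfold sanInner sanSample
    simp only [List.foldl_cons, List.foldl_nil, hread, hval, hset]
    simp [hread, hval, hset, hreadset]
  · subst e3
    obtain rfl : _ = h := Option.some.inj hg
    have hread : PySem.List.pyGet? l ((i : Int) - 1) = some (some 'F') := by
      rw [pyGet_prev l i h0, hv]
    have hval : sanChange.getD ((PySem.List.index? ['C','D','F','G','A'] 'F').getD 0) 'H' = 'J' := by
      decide
    unfold sanInner sanSample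
    simp only [List.foldl_cons, List.foldl_nil, hread, hval, hset]
    simp [hread, hval, hset, hreadset]
  · subst e4
    obtain rfl : _ = h := Option.some.inj hg
    have hread : PySem.List.pyGet? l ((i : Int) - 1) = some (some 'G') := by
      rw [pyGet_prev l i h0, hv]
    have hval : sanChange.getD ((PySem.List.index? ['C','D','F','G','A'] 'G').getD 0) 'H' = 'K' := by
      decide
    unfold sanInner sanSample
    simp only [List.foldl_cons, List.foldl_nil, hread, hval, hset]
    simp [hread, hval, hset, hreadset]
  · subst e5
    obtain rfl : _ = h := Option.some.inj hg
    have hread : PySem.List.pyGet? l ((i : Int) - 1) = some (some 'A') := by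
      rw [pyGet_prev l i h0, hv]
    have hval : sanChange.getD ((PySem.List.index? ['C','D','F','G','A'] 'A').getD 0) 'H' = 'L' := by
      decide
    unfold sanInner sanSample
    simp only [List.foldl_cons, List.foldl_nil, hread, hval, hset]
    simp [hread, hval, hset, hreadset]

theorem sanTgt_succ_congr (cs : List Char) (k p : Nat)
    (h1 : cs.getD p ' ' = '#' → p ≠ k)
    (h2 : cs.getD ((p + 1) % cs.length) ' ' = '#' → (p + 1) % cs.length ≠ k) :
    sanTgt cs (k + 1) p = sanTgt cs k p := by
  unfold sanTgt
  have e1 : (cs.getD p ' ' = '#' ∧ p < k + 1) ↔ (cs.getD p ' ' = '#' ∧ p < k) := by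
    constructor
    · rintro ⟨a, b⟩; exact ⟨a, by have := h1 a; omega⟩
    · rintro ⟨a, b⟩; exact ⟨a, by omega⟩
  have e2 : ((PySem.Dict.get? sanMap (cs.getD p ' ')).isSome = true ∧
        cs.getD ((p + 1) % cs.length) ' ' = '#' ∧ (p + 1) % cs.length < k + 1) ↔
      ((PySem.Dict.get? sanMap (cs.getD p ' ')).isSome = true ∧
        cs.getD ((p + 1) % cs.length) ' ' = '#' ∧ (p + 1) % cs.length < k) := by
    constructor
    · rintro ⟨a, b, c⟩; exact ⟨a, b, by have := h2 b; omega⟩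
    · rintro ⟨a, b, c⟩; exact ⟨a, b, by omega⟩
  rw [if_congr e1 rfl rfl, if_congr e2 rfl rfl]

theorem sanTgt_self_sharp_iff (cs : List Char) (k : Nat) :
    sanTgt cs k k = some '#' ↔ cs.getD k ' ' = '#' := by
  unfold sanTgt
  simp only [lt_irrefl, and_false, if_false]
  split_ifs with h2
  · obtain ⟨hs, -, -⟩ := h2
    rcases hg : PySem.Dict.get? sanMap (cs.getD k ' ') with _ | h
    · simp only [List.getD_eq_getElem?_getD] at hg hs
      rw [hg] at hs
      simp at hs
    · simp only [Option.getD_some, Option.some.injEq]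
      constructor
      · intro he; exact absurd he (sanMap_val_ne_sharp hg)
      · intro he; rw [he] at hg; rw [sanMap_sharp] at hg; cases hg
  · simp

theorem san_loop (cs : List Char) (i : Nat) (hi : i ≤ cs.length) :
    ((List.range i).foldl sanStep (cs.map some)).length = cs.length ∧
    ∀ p, p < cs.length →
      ((List.range i).foldl sanStep (cs.map some))[p]? = some (sanTgt cs i p) := by
  induction i with
  | zero =>
      refine ⟨by simp, ?_⟩
      intro p hp
      simp only [List.range_zero, List.foldl_nil]
      rw [List.getElem?_map, List.getElem?_eq_getElem hp]
      unfold sanTgt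
      simp [List.getD_eq_getElem?_getD, List.getElem?_eq_getElem hp]
  | succ k ih =>
      obtain ⟨hlen, hinv⟩ := ih (by omega)
      have hk : k < cs.length := by omega
      have h0 : 0 < cs.length := by omega
      set L := (List.range k).foldl sanStep (cs.map some) with hL
      rw [List.range_succ, List.foldl_append, List.foldl_cons, List.foldl_nil, ← hL]
      have hguard : PySem.List.pyGet? L ((k : Nat) : Int) = some (sanTgt cs k k) := by
        rw [PySem.List.pyGet?_natCast, hinv k hk]
      rcases Decidable.em (cs.getD k ' ' = '#') with hc | hc
      · -- st[k] == '#'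
        have hstep : sanStep L k = (sanInner k L).set k none := by
          unfold sanStep
          rw [hguard, if_pos (by rw [(sanTgt_self_sharp_iff cs k).mpr hc]),
              PySem.List.pySetD_natCast]
        set t := if k = 0 then cs.length - 1 else k - 1 with ht
        have htl : t < cs.length := by rw [ht]; split <;> omega
        have hidx_eq : (if k = 0 then L.length - 1 else k - 1) = t := by rw [hlen]
        have htk : (t + 1) % cs.length = k := by
          rcases Decidable.em (k = 0) with h | h
          · subst h
            rw [ht, if_pos rfl]
            have h2 : cs.length - 1 + 1 = cs.length := by omega
            rw [h2]
            exact Nat.mod_self _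
          · rw [ht, if_neg h, Nat.sub_add_cancel (by omega), Nat.mod_eq_of_lt hk]
        have hq_eq_t : ∀ p, p < cs.length → (p + 1) % cs.length = k → p = t := by
          intro p hp hq
          rw [ht]
          rcases Decidable.em (k = 0) with h | h
          · rw [if_pos h]; rw [h] at hq
            have hd : cs.length ∣ p + 1 := Nat.dvd_of_mod_eq_zero hq
            have : p + 1 = cs.length := Nat.eq_of_dvd_of_lt_two_mul (by omega) hd (by omega)
            omega
          · rw [if_neg h]
            rcases Decidable.em (p + 1 < cs.length) with h2 | h2
            · rw [Nat.mod_eq_of_lt h2] at hq; omega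
            · have hp1 : p + 1 = cs.length := by omega
              rw [hp1, Nat.mod_self] at hq; omega
        have hvt : L[(if k = 0 then L.length - 1 else k - 1)]? = some (sanTgt cs k t) := by
          rw [hidx_eq]; exact hinv t htl
        have htgt : sanTgt cs k t = if cs.getD t ' ' = '#' ∧ t < k then none
            else some (cs.getD t ' ') := by
          unfold sanTgt
          rw [htk]
          simp only [lt_irrefl, and_false, if_false]
        have hL0 : 0 < L.length := by omega
        have hLk : k < L.length := by omega
        rcases Decidable.em (cs.getD t ' ' = '#' ∧ t < k) with hA | hA
        · -- predecessor already erased: inner loop is a no-op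
          have hIL : sanInner k L = L :=
            sanInner_eq_none L k hL0 hLk (by rw [hvt, htgt, if_pos hA])
          refine ⟨by rw [hstep]; simp [hIL, hlen], ?_⟩
          intro p hp
          rw [hstep, hIL, List.getElem?_set]
          rcases Decidable.em (k = p) with hpk | hpk
          · rw [if_pos hpk, if_pos (by omega)]
            subst hpk
            unfold sanTgt
            rw [if_pos ⟨hc, by omega⟩]
          · rw [if_neg hpk]
            rcases Decidable.em (p = t) with hpt | hpt
            · have hA2 : cs.getD p ' ' = '#' ∧ p < k := by rw [hpt]; exact hA
              rw [hinv p hp]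
              rw [show sanTgt cs k p = none from by
                    unfold sanTgt; rw [if_pos hA2]]
              rw [show sanTgt cs (k + 1) p = none from by
                    unfold sanTgt; rw [if_pos ⟨hA2.1, by omega⟩]]
            · have hq : (p + 1) % cs.length ≠ k := fun he => hpt (hq_eq_t p hp he)
              rw [hinv p hp,
                  sanTgt_succ_congr cs k p (fun _ he => hpk he.symm) (fun _ => hq)]
        · rcases hg : PySem.Dict.get? sanMap (cs.getD t ' ') with _ | h
          · -- predecessor is not a mappable note: inner loop is a no-op
            have hIL : sanInner k L = L :=
              sanInner_eq_unmapped L k hL0 hLk (cs.getD t ' ')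
                (by rw [hvt, htgt, if_neg hA]) hg
            refine ⟨by rw [hstep]; simp [hIL, hlen], ?_⟩
            intro p hp
            rw [hstep, hIL, List.getElem?_set]
            rcases Decidable.em (k = p) with hpk | hpk
            · rw [if_pos hpk, if_pos (by omega)]
              subst hpk
              unfold sanTgt
              rw [if_pos ⟨hc, by omega⟩]
            · rw [if_neg hpk]
              rcases Decidable.em (p = t) with hpt | hpt
              · have hA2 : ¬(cs.getD p ' ' = '#' ∧ p < k) := by rw [hpt]; exact hA
                have hg2 : PySem.Dict.get? sanMap (cs.getD p ' ') = none := by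
                  rw [hpt]; exact hg
                rw [hinv p hp]
                rw [show sanTgt cs k p = some (cs.getD p ' ') from by
                      unfold sanTgt
                      rw [if_neg hA2, if_neg (by rintro ⟨a, -⟩; rw [hg2] at a; simp at a)]]
                rw [show sanTgt cs (k + 1) p = some (cs.getD p ' ') from by
                      unfold sanTgt
                      rw [if_neg (by rintro ⟨a, b⟩; exact hA2 ⟨a, by
                            have : p ≠ k := fun he => hpk he.symm
                            omega⟩),
                          if_neg (by rintro ⟨a, -⟩; rw [hg2] at a; simp at a)]]
              · have hq : (p + 1) % cs.length ≠ k := fun he => hpt (hq_eq_t p hp he)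
                rw [hinv p hp,
                    sanTgt_succ_congr cs k p (fun _ he => hpk he.symm) (fun _ => hq)]
          · -- predecessor is a mappable note followed (cyclically) by this '#': converted
            have hIL : sanInner k L = L.set (if k = 0 then L.length - 1 else k - 1) (some h) :=
              sanInner_eq_mapped L k hL0 hLk (cs.getD t ' ') h
                (by rw [hvt, htgt, if_neg hA]) hg
            rw [hidx_eq] at hIL
            have hILlen : (sanInner k L).length = L.length := by rw [hIL]; simp
            refine ⟨by rw [hstep]; simp [hILlen, hlen], ?_⟩
            intro p hp
            rw [hstep, List.getElem?_set]
            rcases Decidable.em (k = p) with hpk | hpk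
            · rw [if_pos hpk, if_pos (by rw [hILlen]; omega)]
              subst hpk
              unfold sanTgt
              rw [if_pos ⟨hc, by omega⟩]
            · rw [if_neg hpk, hIL, List.getElem?_set]
              rcases Decidable.em (p = t) with hpt | hpt
              · rw [if_pos hpt.symm, if_pos (by rw [hlen]; omega)]
                have htk2 : (p + 1) % cs.length = k := by rw [hpt]; exact htk
                have hg2 : PySem.Dict.get? sanMap (cs.getD p ' ') = some h := by
                  rw [hpt]; exact hg
                have hps : cs.getD p ' ' ≠ '#' := by
                  intro he; rw [he, sanMap_sharp] at hg2; cases hg2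
                unfold sanTgt
                rw [if_neg (by rintro ⟨a, -⟩; exact hps a),
                    if_pos ⟨by rw [hg2]; rfl, by rw [htk2]; exact ⟨hc, by omega⟩⟩, hg2]
                rfl
              · rw [if_neg (fun he => hpt he.symm)]
                have hq : (p + 1) % cs.length ≠ k := fun he => hpt (hq_eq_t p hp he)
                rw [hinv p hp,
                    sanTgt_succ_congr cs k p (fun _ he => hpk he.symm) (fun _ => hq)]
      · -- st[k] != '#'
        have hstep : sanStep L k = L := by
          unfold sanStep
          rw [hguard, if_neg (by
            intro he
            exact hc ((sanTgt_self_sharp_iff cs k).mp (Option.some_injective _ he)))]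
        rw [hstep]
        refine ⟨hlen, ?_⟩
        intro p hp
        rw [hinv p hp,
            sanTgt_succ_congr cs k p (fun a he => hc (he ▸ a)) (fun a he => hc (he ▸ a))]

-- ============ the common intermediate form: one structural pass with lookahead ============
def sanMapD (a : Char) : Char := (PySem.Dict.get? sanMap a).getD a

def specF : List Char → List Char
  | [] => []
  | a :: t => (if a = '#' then [] else if t.head? = some '#' then [sanMapD a] else [a]) ++ specF t

-- ============ B side: splitOn ['#'] is the simple structural split ============
def mySplit : List Char → List (List Char)
  | [] => [[]]
  | c :: t => if c = '#' then [] :: mySplit t else (mySplit t).modifyHead (c :: ·)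

theorem go_eq (fuel : Nat) : ∀ (l cur : List Char) (acc : List (List Char)), l.length < fuel →
    PySem.Chars.splitOn.go ['#'] fuel l cur acc = acc.reverse ++ (mySplit l).modifyHead (cur.reverse ++ ·) := by
  induction fuel with
  | zero => intro l cur acc h; omega
  | succ f ih =>
    intro l cur acc h
    cases l with
    | nil => simp [PySem.Chars.splitOn.go, mySplit]
    | cons c rest =>
      rw [PySem.Chars.splitOn.go]
      by_cases hc : c = '#'
      · subst hc
        have hp : (['#'] : List Char).isPrefixOf ('#' :: rest) = true := by simp [List.isPrefixOf]
        rw [hp, if_pos rfl,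
            show List.drop (['#'] : List Char).length ('#' :: rest) = rest from rfl,
            ih rest [] (cur.reverse :: acc) (by simp at h; omega)]
        simp [mySplit]
        cases mySplit rest <;> simp
      · have hp : (['#'] : List Char).isPrefixOf (c :: rest) = false := by
          simp [List.isPrefixOf]; exact fun e => hc e.symm
        rw [hp, if_neg (by simp),
            ih rest (c :: cur) acc (by simp at h; omega)]
        rw [show mySplit (c :: rest) = (mySplit rest).modifyHead (c :: ·) from by
              simp [mySplit, hc]]
        cases hm : mySplit rest with
        | nil => simp
        | cons a b => simp

theorem splitOn_sharp (cs : List Char) : PySem.Chars.splitOn cs ['#'] = mySplit cs := by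
  rw [PySem.Chars.splitOn, go_eq (cs.length + 1) cs [] [] (by omega)]
  cases hm : mySplit cs with
  | nil => simp
  | cons a b => simp

theorem mySplit_head (t : List Char) :
    (mySplit t).head? = some (t.takeWhile (· != '#')) := by
  induction t with
  | nil => rfl
  | cons c t ih =>
    by_cases hc : c = '#'
    · subst hc; simp [mySplit, List.takeWhile]
    · rw [show mySplit (c :: t) = (mySplit t).modifyHead (c :: ·) from by simp [mySplit, hc]]
      rw [List.head?_modifyHead, ih, List.takeWhile_cons, if_pos (by simp [hc])]
      rfl

theorem mySplit_ne_nil (t : List Char) : mySplit t ≠ [] := by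
  intro h
  have := mySplit_head t
  rw [h] at this
  cases this

theorem mySplit_singleton (t : List Char) : ∀ h, mySplit t = [h] → t = h ∧ '#' ∉ t := by
  induction t with
  | nil =>
    intro h hh
    simp only [mySplit, List.cons.injEq] at hh
    exact ⟨hh.1, by simp⟩
  | cons c t ih =>
    intro h hh
    by_cases hc : c = '#'
    · subst hc
      rw [show mySplit ('#' :: t) = [] :: mySplit t from by simp [mySplit]] at hh
      have ht : mySplit t = [] := by simpa using congrArg List.tail hh
      exact absurd ht (mySplit_ne_nil t)
    · rw [show mySplit (c :: t) = (mySplit t).modifyHead (c :: ·) from by simp [mySplit, hc]] at hh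
      rcases hm : mySplit t with _ | ⟨h0, r⟩
      · exact absurd hm (mySplit_ne_nil t)
      · rw [hm] at hh
        simp only [List.modifyHead, List.cons.injEq] at hh
        obtain ⟨hh1, hh2⟩ := hh
        obtain ⟨ht, hns⟩ := ih h0 (by rw [hm, hh2])
        subst ht
        refine ⟨hh1, ?_⟩
        simp only [List.mem_cons, not_or]
        exact ⟨fun e => hc e.symm, hns⟩

theorem specF_no_sharp (t : List Char) (h : '#' ∉ t) : specF t = t := by
  induction t with
  | nil => rfl
  | cons a t ih =>
    have ha : a ≠ '#' := fun e => h (by rw [e]; exact List.mem_cons_self)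
    have hh : t.head? ≠ some '#' := by
      intro he
      exact h (List.mem_cons_of_mem a (List.mem_of_mem_head? he))
    rw [specF, if_neg ha, if_neg hh, ih (fun hm => h (List.mem_cons_of_mem a hm))]
    simp

theorem getLast?_cons_ne_nil {α : Type} (a : α) (l : List α) (h : l ≠ []) :
    (a :: l).getLast? = l.getLast? := by
  cases l with
  | nil => exact absurd rfl h
  | cons b t => simp [List.getLast?_cons_cons]

theorem exists_getLast?_some {α : Type} (l : List α) (h : l ≠ []) :
    ∃ c, l.getLast? = some c := by
  cases hl : l.getLast? with
  | none => exact absurd (List.getLast?_eq_none_iff.mp hl) h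
  | some c => exact ⟨c, rfl⟩

theorem sanConv_nil : sanConv [] = [] := rfl

theorem sanConv_eq (s : List Char) (hs : s ≠ []) :
    sanConv s = s.dropLast ++ [sanMapD (s.getLast?.getD ' ')] := by
  have hlast : PySem.List.pyGet? s (-1) = s.getLast? := PySem.List.pyGet?_neg_one s
  have hslice : PySem.List.slice s none (some (-1)) = s.dropLast := by
    simp [pysem]
  rw [sanConv, if_pos hs, hlast, hslice]
  rcases exists_getLast?_some s hs with ⟨c, hc⟩
  rw [hc]
  simp [sanMapD, PySem.Dict.getD_eq_get?_getD]

-- B's split-and-rebuild equals the one-pass lookahead form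
theorem B_char (cs : List Char) :
    ((mySplit cs).dropLast.map sanConv).flatten ++ ((mySplit cs).getLast?.getD []) = specF cs := by
  induction cs with
  | nil => rfl
  | cons c t ih =>
    by_cases hc : c = '#'
    · subst hc
      rw [show mySplit ('#' :: t) = [] :: mySplit t from by simp [mySplit],
          List.dropLast_cons_of_ne_nil (mySplit_ne_nil t),
          getLast?_cons_ne_nil _ _ (mySplit_ne_nil t), specF]
      simpa [sanConv_nil] using ih
    · rw [show mySplit (c :: t) = (mySplit t).modifyHead (c :: ·) from by simp [mySplit, hc]]
      rcases hm : mySplit t with _ | ⟨h, r⟩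
      · exact absurd hm (mySplit_ne_nil t)
      rcases hr : r with _ | ⟨r0, r'⟩
      · -- single segment: no '#' anywhere in t
        subst hr
        obtain ⟨ht, hns⟩ := mySplit_singleton t h hm
        subst ht
        rw [specF, if_neg hc,
            if_neg (fun he : t.head? = some '#' =>
              hns (List.mem_of_mem_head? (Option.mem_def.mpr he))),
            specF_no_sharp t hns]
        simp [List.modifyHead]
      · -- at least two segments
        subst hr
        rw [hm] at ih
        simp only [List.modifyHead, List.dropLast_cons₂, List.getLast?_cons_cons,
          List.map_cons, List.flatten_cons, List.append_assoc] at ih ⊢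
        have hhead : t.takeWhile (· != '#') = h := by
          have := mySplit_head t
          rw [hm] at this
          simpa using this.symm
        rcases hh : h with _ | ⟨d, h2⟩
        · -- first segment empty: t starts with '#'
          subst hh
          have hts : t.head? = some '#' := by
            cases t with
            | nil => simp [mySplit] at hm
            | cons a t' =>
              by_cases ha : a = '#'
              · rw [ha]; rfl
              · exfalso
                rw [List.takeWhile_cons, if_pos (by simp [ha])] at hhead
                cases hhead
          rw [specF, if_neg hc, if_pos hts, sanConv_eq [c] (by simp)]
          simp only [sanConv_nil, List.nil_append] at ih
          simp only [List.map_dropLast] at ih ⊢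
          rw [List.map_cons] at ih
          simp [ih]
        · -- first segment nonempty: t starts with d ≠ '#'
          subst hh
          have hd : (d != '#') = true := by
            have h1 : d ∈ List.takeWhile (· != '#') t := by
              rw [hhead]; exact List.mem_cons_self
            exact List.mem_takeWhile_imp (p := (· != '#')) h1
          have htd : t.head? = some d := by
            cases t with
            | nil => simp [mySplit] at hm
            | cons a t' =>
              rw [List.takeWhile_cons] at hhead
              by_cases ha : (a != '#') = true
              · rw [if_pos ha] at hhead
                rw [List.head?_cons, (List.cons.injEq _ _ _ _).mp hhead |>.1]
              · rw [if_neg ha] at hhead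
                cases hhead
          have hcc : sanConv (c :: d :: h2) = c :: sanConv (d :: h2) := by
            rw [sanConv_eq (c :: d :: h2) (by simp), sanConv_eq (d :: h2) (by simp),
                List.dropLast_cons₂, List.getLast?_cons_cons]
            simp
          rw [specF, if_neg hc, if_neg (by rw [htd]; simp; simpa using hd), hcc, ← ih]
          simp

-- A's foldl result, written as a filterMap of sanTgt over the index range
theorem A_eq (st : String) :
    san_score st = String.mk ((List.range st.toList.length).filterMap
      (fun p => sanTgt st.toList st.toList.length p)) := by
  simp only [san_score]
  set cs := st.toList with hcs
  obtain ⟨hlen, hinv⟩ := san_loop cs cs.length le_rfl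
  have hA : (List.range (cs.map some).length).foldl sanStep (cs.map some) =
      (List.range cs.length).map (fun p => sanTgt cs cs.length p) := by
    rw [List.length_map]
    apply List.ext_getElem?
    intro p
    rcases Decidable.em (p < cs.length) with hp | hp
    · rw [hinv p hp, List.getElem?_map, List.getElem?_range hp]
      rfl
    · have e1 : ((List.range cs.length).foldl sanStep (cs.map some))[p]? = none :=
        List.getElem?_eq_none (by rw [hlen]; omega)
      have e2 : ((List.range cs.length).map (fun q => sanTgt cs cs.length q))[p]? = none :=
        List.getElem?_eq_none (by rw [List.length_map, List.length_range]; omega)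
      rw [e1, e2]
  rw [hA, List.filterMap_map]
  rfl

-- evaluating A's per-position result at a valid index
theorem sanTgt_eval (cs : List Char) (k : Nat) (hk : k < cs.length) :
    sanTgt cs cs.length k =
      if cs[k] = '#' then none
      else if (PySem.Dict.get? sanMap cs[k]).isSome = true ∧
              cs.getD ((k + 1) % cs.length) ' ' = '#' then some (sanMapD cs[k])
      else some cs[k] := by
  unfold sanTgt
  rw [List.getD_eq_getElem cs ' ' hk]
  have hmod : (k + 1) % cs.length < cs.length := Nat.mod_lt _ (by omega)
  have e1 : (cs[k] = '#' ∧ k < cs.length) ↔ cs[k] = '#' := and_iff_left hk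
  have e2 : ((PySem.Dict.get? sanMap cs[k]).isSome = true ∧
        cs.getD ((k + 1) % cs.length) ' ' = '#' ∧ (k + 1) % cs.length < cs.length) ↔
      ((PySem.Dict.get? sanMap cs[k]).isSome = true ∧
        cs.getD ((k + 1) % cs.length) ' ' = '#') :=
    Iff.intro (fun h => ⟨h.1, h.2.1⟩) (fun h => ⟨h.1, h.2, hmod⟩)
  rw [if_congr e1 rfl rfl, if_congr e2 rfl rfl]
  rfl

-- outside the wraparound region, A's indexed lookahead is the structural lookahead pass
theorem A_range (cs : List Char)
    (hD : ¬(cs.head? = some '#' ∧ ∃ c, cs.getLast? = some c ∧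
            (PySem.Dict.get? sanMap c).isSome = true)) :
    ∀ m k, k + m = cs.length →
      (List.range' k m).filterMap (fun p => sanTgt cs cs.length p) = specF (cs.drop k) := by
  intro m
  induction m with
  | zero =>
    intro k hk
    rw [List.range'_zero, List.drop_of_length_le (by omega)]
    rfl
  | succ m ih =>
    intro k hk
    have hkl : k < cs.length := by omega
    have h0 : 0 < cs.length := by omega
    have hE := sanTgt_eval cs k hkl
    rw [List.range'_succ, List.filterMap_cons, List.drop_eq_getElem_cons hkl, specF,
        ih (k + 1) (by omega)]
    by_cases hsh : cs[k] = '#'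
    · rw [hE]
      simp [hsh]
    · rcases Decidable.em (k + 1 < cs.length) with hk1 | hk1
      · -- interior position: the lookahead is cs[k+1]
        have hm1 : (k + 1) % cs.length = k + 1 := Nat.mod_eq_of_lt hk1
        have hget1 : cs.getD (k + 1) ' ' = cs[k + 1] := List.getD_eq_getElem cs ' ' hk1
        by_cases hnx : cs[k + 1] = '#'
        · rw [hE, if_neg hsh, hm1, hget1,
              show (cs.drop (k + 1)).head? = some '#' from by
                rw [List.head?_drop, List.getElem?_eq_getElem hk1, hnx]]
          have hmd : ¬(PySem.Dict.get? sanMap cs[k]).isSome = true → sanMapD cs[k] = cs[k] := by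
            intro hg
            rw [sanMapD]
            rcases hgg : PySem.Dict.get? sanMap cs[k] with _ | v
            · rfl
            · rw [hgg] at hg; simp at hg
          rcases Decidable.em ((PySem.Dict.get? sanMap cs[k]).isSome = true) with hg | hg
          · rw [if_pos ⟨hg, hnx⟩]
            simp [hsh]
          · rw [if_neg (fun hx => hg hx.1), hmd hg]
            simp [hsh]
        · rw [hE, if_neg hsh, hm1, hget1, if_neg (fun hx => hnx hx.2)]
          have hh : (cs.drop (k + 1)).head? = cs[k + 1]? := by rw [List.head?_drop]
          simp [hsh, hh, List.getElem?_eq_getElem hk1, hnx]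
      · -- last position: A's lookahead wraps to cs[0]; excluded by hD
        have hm0 : (k + 1) % cs.length = 0 := by
          rw [show k + 1 = cs.length from by omega]; exact Nat.mod_self _
        have hgd0 : cs.getD 0 ' ' = cs[0] := List.getD_eq_getElem cs ' ' h0
        have hcond : ¬((PySem.Dict.get? sanMap cs[k]).isSome = true ∧ cs[0] = '#') := by
          rintro ⟨a, b⟩
          refine hD ⟨?_, cs[k], ?_, a⟩
          · rw [List.head?_eq_getElem?, List.getElem?_eq_getElem h0, b]
          · rw [List.getLast?_eq_getElem?, show cs.length - 1 = k from by omega,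
                List.getElem?_eq_getElem hkl]
        rw [hE, if_neg hsh, hm0, hgd0, if_neg hcond]
        have hh : (cs.drop (k + 1)).head? = none := by
          rw [List.head?_drop, List.getElem?_eq_none (by omega)]
        simp [hsh, hh]

theorem D_iff (st : String) : D_san_score st ↔
    (st.toList.head? = some '#' ∧ ∃ c, st.toList.getLast? = some c ∧
      (PySem.Dict.get? sanMap c).isSome = true) := by
  unfold D_san_score
  refine and_congr_right (fun _ => ?_)
  constructor
  · intro h
    simp only [List.mem_cons, List.not_mem_nil, or_false] at h
    rcases h with h | h | h | h | h
    · exact ⟨'C', h, by decide⟩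
    · exact ⟨'D', h, by decide⟩
    · exact ⟨'F', h, by decide⟩
    · exact ⟨'G', h, by decide⟩
    · exact ⟨'A', h, by decide⟩
  · rintro ⟨c, hc, hs⟩
    rw [sanMap_get?_eq] at hs
    split_ifs at hs with e1 e2 e3 e4 e5
    · subst e1; rw [hc]; simp
    · subst e2; rw [hc]; simp
    · subst e3; rw [hc]; simp
    · subst e4; rw [hc]; simp
    · subst e5; rw [hc]; simp
    · simp at hs

-- ============ tightness: inside D_, A's mapped last character makes the outputs differ ============
-- A's per-position pass inside D_: the final (singleton) position is converted through the map
def specFD : List Char → List Char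
  | [] => []
  | [a] => if a = '#' then [] else [sanMapD a]
  | a :: b :: t => (if a = '#' then [] else if b = '#' then [sanMapD a] else [a]) ++ specFD (b :: t)

theorem sanMapD_ne (c : Char) (hS : (PySem.Dict.get? sanMap c).isSome = true) :
    sanMapD c ≠ c := by
  rw [sanMapD]
  rw [sanMap_get?_eq] at hS ⊢
  split_ifs at hS ⊢ with e1 e2 e3 e4 e5
  · subst e1; decide
  · subst e2; decide
  · subst e3; decide
  · subst e4; decide
  · subst e5; decide
  · simp at hS

theorem tail_ne : ∀ (t : List Char) (c : Char), t.getLast? = some c →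
    (PySem.Dict.get? sanMap c).isSome = true → specFD t ≠ specF t := by
  intro t
  induction t with
  | nil => intro c hL _; cases hL
  | cons a t ih =>
    intro c hL hS
    cases t with
    | nil =>
      have hac : c = a := by simpa using hL.symm
      subst hac
      have hsh : c ≠ '#' := by
        intro e; rw [e, sanMap_sharp] at hS; cases hS
      rw [show specFD [c] = [sanMapD c] from by rw [specFD, if_neg hsh],
          show specF [c] = [c] from by
            rw [specF, if_neg hsh, if_neg (by simp)]
            simp [specF]]
      intro he
      exact sanMapD_ne c hS (by simpa using he)
    | cons b t' =>
      rw [List.getLast?_cons_cons] at hL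
      intro he
      have hEE : (if a = '#' then ([] : List Char)
            else if (b :: t').head? = some '#' then [sanMapD a] else [a])
          = (if a = '#' then [] else if b = '#' then [sanMapD a] else [a]) := by
        by_cases hb : b = '#' <;> simp [hb]
      rw [specFD, specF, hEE] at he
      exact ih c hL hS (List.append_cancel_left he)

-- inside D_, A's indexed lookahead is specFD (the wraparound fires at the last position)
theorem A_rangeD (cs : List Char) (hH : cs.head? = some '#') (c : Char)
    (hL : cs.getLast? = some c) (hS : (PySem.Dict.get? sanMap c).isSome = true) :
    ∀ m k, k + m = cs.length →
      (List.range' k m).filterMap (fun p => sanTgt cs cs.length p) = specFD (cs.drop k) := by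
  intro m
  induction m with
  | zero =>
    intro k hk
    rw [List.range'_zero, List.drop_of_length_le (by omega)]
    rfl
  | succ m ih =>
    intro k hk
    have hkl : k < cs.length := by omega
    have h0 : 0 < cs.length := by omega
    have hE := sanTgt_eval cs k hkl
    rw [List.range'_succ, List.filterMap_cons, ih (k + 1) (by omega)]
    rcases Decidable.em (k + 1 < cs.length) with hk1 | hk1
    · -- interior position
      rw [List.drop_eq_getElem_cons hkl, List.drop_eq_getElem_cons hk1, specFD]
      by_cases hsh : cs[k] = '#'
      · rw [hE]
        simp [hsh]
      · have hm1 : (k + 1) % cs.length = k + 1 := Nat.mod_eq_of_lt hk1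
        have hget1 : cs.getD (k + 1) ' ' = cs[k + 1] := List.getD_eq_getElem cs ' ' hk1
        by_cases hnx : cs[k + 1] = '#'
        · rw [hE, if_neg hsh, hm1, hget1]
          have hmd : ¬(PySem.Dict.get? sanMap cs[k]).isSome = true → sanMapD cs[k] = cs[k] := by
            intro hg
            rw [sanMapD]
            rcases hgg : PySem.Dict.get? sanMap cs[k] with _ | v
            · rfl
            · rw [hgg] at hg; simp at hg
          rcases Decidable.em ((PySem.Dict.get? sanMap cs[k]).isSome = true) with hg | hg
          · rw [if_pos ⟨hg, hnx⟩]
            simp [hsh, hnx]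
          · rw [if_neg (fun hx => hg hx.1), hmd hg]
            simp [hsh, hnx]
        · rw [hE, if_neg hsh, hm1, hget1, if_neg (fun hx => hnx hx.2)]
          simp [hsh, hnx]
    · -- last position: the wraparound lookahead reads cs[0] = '#'
      have hc0 : cs[0] = '#' := by
        rw [List.head?_eq_getElem?, List.getElem?_eq_getElem h0] at hH
        exact Option.some.inj hH
      have hck : cs[k] = c := by
        rw [List.getLast?_eq_getElem?, show cs.length - 1 = k from by omega,
            List.getElem?_eq_getElem hkl] at hL
        exact Option.some.inj hL
      have hm0 : (k + 1) % cs.length = 0 := by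
        rw [show k + 1 = cs.length from by omega]; exact Nat.mod_self _
      have hgd0 : cs.getD 0 ' ' = cs[0] := List.getD_eq_getElem cs ' ' h0
      rw [List.drop_eq_getElem_cons hkl, List.drop_of_length_le (by omega)]
      by_cases hsh : cs[k] = '#'
      · rw [hE]
        simp [hsh, specFD]
      · rw [hE, if_neg hsh, hm0, hgd0, if_pos ⟨by rw [hck]; exact hS, by rw [hc0]⟩]
        simp [hsh, specFD]

theorem B_eq (st : String) : san_score_alt st = String.mk (specF st.toList) := by
  simp only [san_score_alt]
  rw [splitOn_sharp, PySem.List.pyGet?_neg_one, B_char]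

theorem mk_inj (l1 l2 : List Char) (h : String.mk l1 = String.mk l2) : l1 = l2 := by
  rw [show String.mk l1 = String.ofList l1 from rfl,
      show String.mk l2 = String.ofList l2 from rfl] at h
  have := congrArg String.toList h
  rwa [String.toList_ofList, String.toList_ofList] at this

-- ===== VERDICT (by name: the statements are the Claim_ definitions above) =====
theorem san_score_spec : Claim_unchanged_san_score := by
  intro st _
  unfold Spec_san_score
  intro hD
  rw [A_eq st, List.range_eq_range',
      A_range st.toList (fun h => hD ((D_iff st).mpr h)) st.toList.length 0 (by omega),
      List.drop_zero]
  rw [B_eq]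

theorem san_score_changed : Claim_changed_san_score := by
  unfold Claim_changed_san_score
  decide

theorem san_score_tight : Claim_exact_san_score := by
  intro st _ hD
  obtain ⟨hH, c, hL, hS⟩ := (D_iff st).mp hD
  intro he
  rw [A_eq st, B_eq st, List.range_eq_range',
      A_rangeD st.toList hH c hL hS st.toList.length 0 (by omega), List.drop_zero] at he
  exact tail_ne st.toList c hL hS (mk_inj _ _ he)
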